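-- pv_equiv track=rewrite | github.com/lkrsnik/decypher_text | decypher.py | find_viable_words
-- ===== SOURCE A (Python) =====
-- def find_viable_words(eng_words, find_word, duplicate_letters, forbidden_letters):
--     indices = list(range(len(eng_words[len(find_word)])))
--     for l_i, l in enumerate(find_word):
--         if l != '_':
--             viable_indices = []
--             for i in indices:
--                 if eng_words[len(find_word)][i][l_i] == find_word[l_i]:
--                     viable_indices.append(i)
--             indices = viable_indices
--         else:
--             viable_indices = []
--             for i in indices:
--                 if eng_words[len(find_word)][i][l_i] not in forbidden_letters:
--                     viable_indices.append(i)
--             indices = viable_indices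
--
--
--     res = []
--     for i in indices:
--         if duplicate_letters and eng_words[len(find_word)][i][duplicate_letters[0]] != eng_words[len(find_word)][i][duplicate_letters[1]]:
--
--             continue
--
--         res.append(eng_words[len(find_word)][i])
--
--     return res
-- ===== SOURCE B (Python) =====
-- def find_viable_words(eng_words, find_word, duplicate_letters, forbidden_letters):
--     res = []
--     for word in eng_words[len(find_word)]:
--         ok = True
--         for l_i, l in enumerate(find_word):
--             c = word[l_i]
--             if l != '_':
--                 if c != l:
--                     ok = False
--                     break
--             elif c in forbidden_letters:
--                 ok = False
--                 break
--         if ok and (not duplicate_letters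
--                    or word[duplicate_letters[0]] == word[duplicate_letters[1]]):
--             res.append(word)
--     return res
-- ===== Notes on version B (the rewrite author's own statement) =====
-- stated objective: simpler
-- what changed: One row-major pass that tests each word against all pattern positions and the duplicate constraint directly, replacing A's per-position column passes over a shrinking list of indices into the bucket.
import Mathlib
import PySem

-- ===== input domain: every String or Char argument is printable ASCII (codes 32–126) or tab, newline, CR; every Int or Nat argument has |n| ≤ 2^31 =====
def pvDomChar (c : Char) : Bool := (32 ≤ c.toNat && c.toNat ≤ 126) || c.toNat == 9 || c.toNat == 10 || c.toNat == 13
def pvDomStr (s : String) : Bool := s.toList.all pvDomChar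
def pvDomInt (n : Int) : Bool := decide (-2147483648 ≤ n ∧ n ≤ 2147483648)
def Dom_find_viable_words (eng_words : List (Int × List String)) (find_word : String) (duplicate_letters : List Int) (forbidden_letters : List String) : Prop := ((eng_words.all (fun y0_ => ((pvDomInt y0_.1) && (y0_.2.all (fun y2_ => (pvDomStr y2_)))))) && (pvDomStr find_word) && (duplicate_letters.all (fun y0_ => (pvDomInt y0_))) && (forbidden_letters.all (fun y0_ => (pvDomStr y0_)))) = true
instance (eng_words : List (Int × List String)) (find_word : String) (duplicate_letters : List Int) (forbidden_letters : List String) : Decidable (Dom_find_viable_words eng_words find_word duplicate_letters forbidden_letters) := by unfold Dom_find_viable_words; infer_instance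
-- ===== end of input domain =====

-- B replaces A's column-major filtering passes over a shrinking index list by a single
-- row-major pass testing each word directly (simpler decomposition, same asymptotic cost).

-- ===== PORT A =====
-- shared helper: Python "c not in forbidden_letters" on a looked-up character
-- (none = the character access would raise IndexError, excluded by Pre_)
def pvNotForbidden (c? : Option Char) (forb : List String) : Bool :=
  match c? with
  | some c => !(forb.contains (String.ofList [c]))
  | none => false

def find_viable_words (eng_words : List (Int × List String)) (find_word : String) (duplicate_letters : List Int) (forbidden_letters : List String) : List String :=
  let bucket := (eng_words.lookup (Int.ofNat find_word.length)).getD []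
  let indices0 := List.range bucket.length
  let indices :=
    (PySem.List.enumerate find_word.toList).foldl
      (fun indices p =>
        if p.2 ≠ '_' then
          indices.foldl (fun acc i =>
            if PySem.Str.pyGet? (bucket.getD i "") p.1 = PySem.Str.pyGet? find_word p.1
            then acc ++ [i] else acc) []
        else
          indices.foldl (fun acc i =>
            if pvNotForbidden (PySem.Str.pyGet? (bucket.getD i "") p.1) forbidden_letters
            then acc ++ [i] else acc) [])
      indices0
  indices.foldl (fun res i =>
    if duplicate_letters ≠ [] ∧
       PySem.Str.pyGet? (bucket.getD i "") (PySem.List.pyGetD duplicate_letters 0 0) ≠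
       PySem.Str.pyGet? (bucket.getD i "") (PySem.List.pyGetD duplicate_letters 1 0)
    then res else res ++ [bucket.getD i ""]) []

-- ===== PORT B =====
def find_viable_words_alt (eng_words : List (Int × List String)) (find_word : String) (duplicate_letters : List Int) (forbidden_letters : List String) : List String :=
  let bucket := (eng_words.lookup (Int.ofNat find_word.length)).getD []
  bucket.filter (fun w =>
    ((PySem.List.enumerate find_word.toList).all (fun p =>
      if p.2 ≠ '_' then
        match PySem.Str.pyGet? w p.1 with
        | some c => c == p.2
        | none => false
      else pvNotForbidden (PySem.Str.pyGet? w p.1) forbidden_letters))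
    && (duplicate_letters.isEmpty
        || PySem.Str.pyGet? w (PySem.List.pyGetD duplicate_letters 0 0)
           == PySem.Str.pyGet? w (PySem.List.pyGetD duplicate_letters 1 0)))

-- ===== PRECONDITION & SPEC =====
-- the test the pattern applies to position j of word w (statically, via getD; the
-- defaults are irrelevant at the in-range positions Pre_ quantifies over)
def pvPosOkAt (fw : String) (forb : List String) (w : String) (j : Nat) : Bool :=
  if fw.toList.getD j '_' = '_' then !(forb.contains (String.ofList [w.toList.getD j ' ']))
  else w.toList.getD j ' ' == fw.toList.getD j '_'

-- Pre_ holds exactly when Python A returns: the length key is present (else KeyError), and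
-- no bucket word survives the pattern tests up to an out-of-range character access (a word
-- shorter than the pattern, or a surviving word with duplicate_letters lacking two in-range
-- indices would raise IndexError).
def Pre_find_viable_words (eng_words : List (Int × List String)) (find_word : String) (duplicate_letters : List Int) (forbidden_letters : List String) : Prop :=
  (eng_words.lookup (Int.ofNat find_word.length)).isSome ∧
  ∀ w ∈ (eng_words.lookup (Int.ofNat find_word.length)).getD [],
    ¬ (w.toList.length < find_word.toList.length ∧
        ∀ j < w.toList.length, pvPosOkAt find_word forbidden_letters w j = true) ∧
    ¬ (duplicate_letters ≠ [] ∧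
        (∀ j < find_word.toList.length, pvPosOkAt find_word forbidden_letters w j = true) ∧
        ¬ (2 ≤ duplicate_letters.length ∧
           PySem.Raise.InRange w.toList.length (PySem.List.pyGetD duplicate_letters 0 0) ∧
           PySem.Raise.InRange w.toList.length (PySem.List.pyGetD duplicate_letters 1 0)))
instance (eng_words : List (Int × List String)) (find_word : String) (duplicate_letters : List Int) (forbidden_letters : List String) : Decidable (Pre_find_viable_words eng_words find_word duplicate_letters forbidden_letters) := by unfold Pre_find_viable_words; infer_instance

def pvWitness_find_viable_words : (List (Int × List String)) × String × List Int × List String :=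
  ([(3, ["cat", "cot", "dog"])], "c_t", [], ["o"])

def Spec_find_viable_words (eng_words : List (Int × List String)) (find_word : String) (duplicate_letters : List Int) (forbidden_letters : List String) (out : List String) : Prop := out = find_viable_words_alt eng_words find_word duplicate_letters forbidden_letters
instance (eng_words : List (Int × List String)) (find_word : String) (duplicate_letters : List Int) (forbidden_letters : List String) (out : List String) : Decidable (Spec_find_viable_words eng_words find_word duplicate_letters forbidden_letters out) := by unfold Spec_find_viable_words; infer_instance

-- ===== CLAIM (what is proved, stated in full; the proofs are below) =====
def Claim_equal_find_viable_words : Prop := ∀ (eng_words : List (Int × List String)) (find_word : String) (duplicate_letters : List Int) (forbidden_letters : List String), Dom_find_viable_words eng_words find_word duplicate_letters forbidden_letters → Pre_find_viable_words eng_words find_word duplicate_letters forbidden_letters → Spec_find_viable_words eng_words find_word duplicate_letters forbidden_letters (find_viable_words eng_words find_word duplicate_letters forbidden_letters)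

-- ===== LEMMAS AND PROOFS =====

-- folding successive filters = one filter by the conjunction
lemma pv_foldl_filter_all {α β : Type} (es : List α) (c : α → β → Bool) :
    ∀ idx : List β, es.foldl (fun idx e => idx.filter (c e)) idx
      = idx.filter (fun i => es.all (fun e => c e i)) := by
  induction es with
  | nil => intro idx; simp
  | cons e es ih =>
    intro idx
    rw [List.foldl_cons, ih, List.filter_filter]
    apply List.filter_congr
    intro i _
    simp [Bool.and_comm]

-- indexing a filtered range of indices = filtering the list itself
lemma pv_filter_range_map {α : Type} (d : α) (f : α → Bool) :
    ∀ xs : List α, ((List.range xs.length).filter (fun i => f (xs.getD i d))).map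
        (fun i => xs.getD i d) = xs.filter f := by
  intro xs
  induction xs with
  | nil => simp
  | cons x t ih =>
    rw [List.length_cons, List.range_succ_eq_map, List.filter_cons]
    by_cases hx : f x <;>
      simp only [List.getD_cons_zero, hx, if_pos, if_neg, Bool.false_eq_true,
        not_false_iff, List.filter_map, List.map_cons, List.map_map] <;>
      simpa [Function.comp, List.getD, List.getElem?_cons_succ, hx] using ih

lemma pv_foldl_skip_append {α β : Type} (g : α → β) (q : α → Prop) [DecidablePred q] :
    ∀ (idx : List α) (acc : List β),
      idx.foldl (fun res i => if q i then res else res ++ [g i]) acc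
        = acc ++ (idx.filter (fun i => !decide (q i))).map g := by
  intro idx
  induction idx with
  | nil => simp
  | cons i t ih =>
    intro acc
    by_cases h : q i <;> simp [h, ih]

lemma pv_all_congr {α : Type} {f g : α → Bool} :
    ∀ l : List α, (∀ x ∈ l, f x = g x) → l.all f = l.all g := by
  intro l
  induction l with
  | nil => simp
  | cons x t ih =>
    intro h
    simp [List.all_cons, h x (by simp), ih (fun y hy => h y (by simp [hy]))]

-- the per-position test A applies column-wise
def pvColOk (fw : String) (forb : List String) (p : Int × Char) (w : String) : Bool :=
  if p.2 ≠ '_' then decide (PySem.Str.pyGet? w p.1 = PySem.Str.pyGet? fw p.1)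
  else pvNotForbidden (PySem.Str.pyGet? w p.1) forb

-- the per-position test of B, and A's equals it on every member of the enumeration
lemma pv_pos_congr (fw : String) (forb : List String) (w : String)
    (p : Int × Char) (hp : p ∈ PySem.List.enumerate fw.toList) :
    pvColOk fw forb p w
      = (if p.2 ≠ '_' then
           match PySem.Str.pyGet? w p.1 with
           | some c => c == p.2
           | none => false
         else pvNotForbidden (PySem.Str.pyGet? w p.1) forb) := by
  rcases (PySem.List.mem_enumerate_iff _ _ _).1 hp with ⟨k, hk, rfl⟩
  unfold pvColOk
  rcases h : PySem.Str.pyGet? w ((0 : Int) + k) with _ | c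
  · simp [pvNotForbidden, List.getElem?_eq_getElem hk]
  · split
    · by_cases hc : c = fw.toList[k] <;> simp [hc, List.getElem?_eq_getElem hk]
    · rfl

-- ===== VERDICT (by name: the statement is the Claim_ definition above) =====
theorem find_viable_words_spec : Claim_equal_find_viable_words := by
  intro eng_words find_word duplicate_letters forbidden_letters _ _
  unfold Spec_find_viable_words find_viable_words find_viable_words_alt
  dsimp only
  set bucket := (eng_words.lookup (Int.ofNat find_word.length)).getD [] with hb
  set es := PySem.List.enumerate find_word.toList with hes
  -- A's column-wise passes are successive filters
  have hstep : (fun (indices : List Nat) (p : Int × Char) =>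
      if p.2 ≠ '_' then
        indices.foldl (fun acc i =>
          if PySem.Str.pyGet? (bucket.getD i "") p.1 = PySem.Str.pyGet? find_word p.1
          then acc ++ [i] else acc) []
      else
        indices.foldl (fun acc i =>
          if pvNotForbidden (PySem.Str.pyGet? (bucket.getD i "") p.1) forbidden_letters
          then acc ++ [i] else acc) [])
      = fun indices p => indices.filter
          (fun i => pvColOk find_word forbidden_letters p (bucket.getD i "")) := by
    funext indices p
    by_cases hp : p.2 ≠ '_' <;>
      simp [hp, pvColOk, PySem.List.foldl_append_ite_eq_filter]
  rw [hstep, pv_foldl_filter_all, pv_foldl_skip_append, List.nil_append,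
    List.filter_filter]
  have hmain : ∀ f : String → Bool,
      ((List.range bucket.length).filter (fun i => f (bucket.getD i ""))).map
        (fun i => bucket.getD i "") = bucket.filter f := fun f => pv_filter_range_map "" f bucket
  rw [hmain (fun w => (!decide (duplicate_letters ≠ [] ∧
      PySem.Str.pyGet? w (PySem.List.pyGetD duplicate_letters 0 0) ≠
      PySem.Str.pyGet? w (PySem.List.pyGetD duplicate_letters 1 0))) &&
      es.all (fun e => pvColOk find_word forbidden_letters e w))]
  refine List.filter_congr (fun w _ => ?_)
  have hall : es.all (fun e => pvColOk find_word forbidden_letters e w)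
      = es.all (fun p =>
          if p.2 ≠ '_' then
            match PySem.Str.pyGet? w p.1 with
            | some c => c == p.2
            | none => false
          else pvNotForbidden (PySem.Str.pyGet? w p.1) forbidden_letters) := by
    exact pv_all_congr es (fun p hp => pv_pos_congr find_word forbidden_letters w p hp)
  rw [hall]
  by_cases hdl : duplicate_letters = [] <;>
    by_cases heq : PySem.List.pyGet? w.toList (PySem.List.pyGetD duplicate_letters 0 0)
        = PySem.List.pyGet? w.toList (PySem.List.pyGetD duplicate_letters 1 0) <;>
    simp [hdl, heq, Bool.and_comm, beq_iff_eq, List.isEmpty_iff]
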